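-- pv_equiv track=rewrite | github.com/jahirulislammolla/CodeFights | Fights/lateRide.py | lateRide
-- ===== SOURCE A (Python) =====
-- def lateRide(n):
--     x=n%60
--     a=n//60
--     s=0
--     while x>0:
--         s+=x%10
--         x//=10
--     while a>0:
--         s+=a%10
--         a//=10
--     return s
-- ===== SOURCE B (Python) =====
-- def lateRide(n):
--     # digit sum via the identity digitsum(x) = x - 9 * sum(x // 10**k for k >= 1)
--     def digit_sum(x):
--         total, k = 0, 1
--         while 10 ** k <= x:
--             total += x // 10 ** k
--             k += 1
--         return x - 9 * total
--     hours = n // 60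
--     s = digit_sum(n % 60)
--     if hours > 0:
--         s += digit_sum(hours)
--     return s
-- ===== Notes on version B (the rewrite author's own statement) =====
-- stated objective: alternative
-- what changed: B replaces A's two digit-extraction loops (repeated remainder/quotient steps with a running digit accumulator) by the closed identity digitsum(x) = x minus nine times the sum of the truncated quotients of x by the successive positive powers of ten.
import Mathlib
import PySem

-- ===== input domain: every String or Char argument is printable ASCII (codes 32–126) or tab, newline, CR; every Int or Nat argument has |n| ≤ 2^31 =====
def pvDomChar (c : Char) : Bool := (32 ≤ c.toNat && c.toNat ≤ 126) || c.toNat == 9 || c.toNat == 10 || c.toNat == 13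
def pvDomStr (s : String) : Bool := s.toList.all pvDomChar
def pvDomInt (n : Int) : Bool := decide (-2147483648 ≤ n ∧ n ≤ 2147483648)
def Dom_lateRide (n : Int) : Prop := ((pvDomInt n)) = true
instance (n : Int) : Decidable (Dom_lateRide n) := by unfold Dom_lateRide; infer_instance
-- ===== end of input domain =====

-- B replaces A's two %10-//10 digit loops by the identity digitsum(x) = x - 9*Σ_{k≥1} x//10^k (objective: alternative).

-- ===== PORT A =====
-- while x > 0: s += x % 10; x //= 10
def lateRideLoop (s x : Int) : Int :=
  if 0 < x then
    lateRideLoop (s + PySem.Int.mod x 10) (PySem.Int.floordiv x 10)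
  else s
termination_by x.toNat
decreasing_by
  rw [PySem.Int.floordiv_eq_ediv_of_pos (by norm_num)]
  omega

def lateRide (n : Int) : Int :=
  let x := PySem.Int.mod n 60
  let a := PySem.Int.floordiv n 60
  let s : Int := 0
  let s := lateRideLoop s x
  let s := lateRideLoop s a
  s

-- ===== PORT B =====
-- while 10 ** k <= x: total += x // 10 ** k; k += 1
def digitSumAux (total : Int) (k : Nat) (x : Int) : Int :=
  if ((10 ^ k : Nat) : Int) ≤ x then
    digitSumAux (total + PySem.Int.floordiv x ((10 ^ k : Nat) : Int)) (k + 1) x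
  else total
termination_by x.toNat + 1 - 10 ^ k
decreasing_by
  have h1 : (10 : Nat) ^ k < 10 ^ (k + 1) :=
    Nat.pow_lt_pow_right (by norm_num) (Nat.lt_succ_self k)
  have h2 : (10 : Nat) ^ k ≤ x.toNat := by omega
  omega

def digitSumB (x : Int) : Int := x - 9 * digitSumAux 0 1 x

def lateRide_alt (n : Int) : Int :=
  let hours := PySem.Int.floordiv n 60
  let s := digitSumB (PySem.Int.mod n 60)
  if 0 < hours then s + digitSumB hours else s

-- ===== PRECONDITION & SPEC =====
def Spec_lateRide (n : Int) (out : Int) : Prop := out = lateRide_alt n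
instance (n : Int) (out : Int) : Decidable (Spec_lateRide n out) := by unfold Spec_lateRide; infer_instance

-- ===== CLAIM (what is proved, stated in full; the proofs are below) =====
def Claim_equal_lateRide : Prop := ∀ (n : Int), Dom_lateRide n → Spec_lateRide n (lateRide n)

-- ===== LEMMAS AND PROOFS =====
theorem lateRideLoop_acc (s x : Int) : lateRideLoop s x = s + lateRideLoop 0 x := by
  generalize hN : x.toNat = N
  induction N using Nat.strong_induction_on generalizing s x with
  | _ N IH =>
    conv_lhs => rw [lateRideLoop]
    conv_rhs => rw [lateRideLoop]
    by_cases h : 0 < x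
    · rw [if_pos h, if_pos h]
      have hd : PySem.Int.floordiv x 10 = x / 10 :=
        PySem.Int.floordiv_eq_ediv_of_pos (by norm_num)
      have hlt : (PySem.Int.floordiv x 10).toNat < N := by rw [hd]; omega
      rw [IH _ hlt _ _ rfl, IH _ hlt (0 + PySem.Int.mod x 10) _ rfl]
      ring
    · rw [if_neg h, if_neg h]; ring

theorem digitSumAux_acc (t : Int) (k : Nat) (x : Int) :
    digitSumAux t k x = t + digitSumAux 0 k x := by
  generalize hN : x.toNat + 1 - 10 ^ k = N
  induction N using Nat.strong_induction_on generalizing t k with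
  | _ N IH =>
    conv_lhs => rw [digitSumAux]
    conv_rhs => rw [digitSumAux]
    by_cases h : ((10 ^ k : Nat) : Int) ≤ x
    · rw [if_pos h, if_pos h]
      have h1 : (10 : Nat) ^ k < 10 ^ (k + 1) :=
        Nat.pow_lt_pow_right (by norm_num) (Nat.lt_succ_self k)
      have h2 : (10 : Nat) ^ k ≤ x.toNat := by omega
      have hlt : x.toNat + 1 - 10 ^ (k + 1) < N := by omega
      rw [IH _ hlt _ _ rfl, IH _ hlt (0 + PySem.Int.floordiv x ((10 ^ k : Nat) : Int)) _ rfl]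
      ring
    · rw [if_neg h, if_neg h]; ring

theorem digitSumAux_shift (k : Nat) (x : Int) (hx : 0 ≤ x) :
    digitSumAux 0 (k + 1) x = digitSumAux 0 k (PySem.Int.floordiv x 10) := by
  have hd10 : PySem.Int.floordiv x 10 = x / 10 :=
    PySem.Int.floordiv_eq_ediv_of_pos (by norm_num)
  generalize hN : x.toNat + 1 - 10 ^ (k + 1) = N
  induction N using Nat.strong_induction_on generalizing k with
  | _ N IH =>
    conv_lhs => rw [digitSumAux]
    conv_rhs => rw [digitSumAux]
    have hguard : (((10 ^ (k + 1) : Nat) : Int) ≤ x) ↔ (((10 ^ k : Nat) : Int) ≤ PySem.Int.floordiv x 10) := by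
      rw [hd10, Int.le_ediv_iff_mul_le (by norm_num)]
      push_cast
      have hps : (10:Int) ^ (k + 1) = 10 ^ k * 10 := pow_succ 10 k
      constructor <;> intro h <;> linarith
    by_cases h : ((10 ^ (k + 1) : Nat) : Int) ≤ x
    · rw [if_pos h, if_pos (hguard.mp h)]
      have hq : PySem.Int.floordiv (PySem.Int.floordiv x 10) ((10 ^ k : Nat) : Int) =
          PySem.Int.floordiv x ((10 ^ (k + 1) : Nat) : Int) := by
        rw [hd10, PySem.Int.floordiv_eq_ediv_of_pos (by positivity),
            PySem.Int.floordiv_eq_ediv_of_pos (by positivity),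
            Int.ediv_ediv_of_nonneg (by norm_num)]
        push_cast [pow_succ]
        ring_nf
      rw [digitSumAux_acc]
      conv_rhs => rw [digitSumAux_acc]
      have h1 : (10 : Nat) ^ (k + 1) < 10 ^ (k + 1 + 1) :=
        Nat.pow_lt_pow_right (by norm_num) (by omega)
      have h2 : (10 : Nat) ^ (k + 1) ≤ x.toNat := by
        generalize hp : (10 : Nat) ^ (k + 1) = p at h ⊢
        omega
      have hlt : x.toNat + 1 - 10 ^ (k + 1 + 1) < N := by omega
      rw [IH _ hlt (k + 1) rfl, hq]
    · rw [if_neg h, if_neg (fun hc => h (hguard.mpr hc))]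

theorem digitSumAux_rec (x : Int) (hx : 0 ≤ x) :
    digitSumAux 0 1 x = x / 10 + digitSumAux 0 1 (x / 10) := by
  by_cases h10 : ((10 ^ 1 : Nat) : Int) ≤ x
  · conv_lhs => rw [digitSumAux]
    rw [if_pos h10, digitSumAux_acc]
    have hfd : PySem.Int.floordiv x ((10 ^ 1 : Nat) : Int) = x / 10 := by
      rw [PySem.Int.floordiv_eq_ediv_of_pos (by norm_num)]; norm_num
    have hsh : digitSumAux 0 (1 + 1) x = digitSumAux 0 1 (PySem.Int.floordiv x 10) :=
      digitSumAux_shift 1 x hx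
    rw [hfd, hsh, PySem.Int.floordiv_eq_ediv_of_pos (by norm_num)]
    ring
  · have hx10 : x / 10 = 0 := by
      push_cast at h10; omega
    conv_lhs => rw [digitSumAux]
    rw [if_neg h10, hx10]
    rw [show digitSumAux 0 1 (0:Int) = 0 by rw [digitSumAux, if_neg (by norm_num)]]
    norm_num

theorem loop_eq_digitSumB (x : Int) (hx : 0 ≤ x) : lateRideLoop 0 x = digitSumB x := by
  generalize hN : x.toNat = N
  induction N using Nat.strong_induction_on generalizing x with
  | _ N IH =>
    unfold digitSumB
    rw [lateRideLoop]
    by_cases h : 0 < x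
    · rw [if_pos h]
      have hd : PySem.Int.floordiv x 10 = x / 10 :=
        PySem.Int.floordiv_eq_ediv_of_pos (by norm_num)
      have hm : PySem.Int.mod x 10 = x % 10 :=
        PySem.Int.mod_eq_emod_of_pos (by norm_num)
      have hlt : (PySem.Int.floordiv x 10).toNat < N := by rw [hd]; omega
      have hx10 : 0 ≤ PySem.Int.floordiv x 10 := by rw [hd]; positivity
      rw [lateRideLoop_acc, IH _ hlt _ hx10 rfl]
      unfold digitSumB
      rw [digitSumAux_rec x hx, hd, hm]
      have := Int.emod_add_mul_ediv x 10
      ring_nf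
      omega
    · rw [if_neg h]
      have hx0 : x = 0 := by omega
      subst hx0
      rw [digitSumAux, if_neg (by norm_num)]
      norm_num

-- ===== VERDICT (by name: the statement is the Claim_ definition above) =====
theorem lateRide_spec : Claim_equal_lateRide := by
  intro n _
  unfold Spec_lateRide lateRide lateRide_alt
  simp only []
  have hm : 0 ≤ PySem.Int.mod n 60 := PySem.Int.mod_nonneg n (by norm_num)
  rw [lateRideLoop_acc, loop_eq_digitSumB _ hm]
  by_cases h : 0 < PySem.Int.floordiv n 60
  · rw [if_pos h, lateRideLoop_acc, loop_eq_digitSumB _ (le_of_lt h)]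
    ring
  · rw [if_neg h]
    rw [show lateRideLoop 0 (PySem.Int.floordiv n 60) = 0 by
      rw [lateRideLoop, if_neg h]]
    ring
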